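-- pv_equiv track=rewrite | github.com/skota-in/PyJHora | src/jhora/horoscope/dhasa/graha/dwadasottari.py | _antardhasa
-- ===== SOURCE A (Python) =====
-- dhasa_adhipathi_list = {0:7,4:9,8:11,3:13,7:15,2:17,6:19,1:21} #  Total 112 years
--
-- def _next_adhipati(lord,dirn=1):
--     """Returns next lord after `lord` in the adhipati_list"""
--     current = list(dhasa_adhipathi_list.keys()).index(lord)
--     next_lord = list(dhasa_adhipathi_list.keys())[((current + dirn) % len(dhasa_adhipathi_list))]
--     return next_lord
--
-- def _antardhasa(dhasa_lord,antardhasa_option=1):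
--     lord = dhasa_lord
--     if antardhasa_option in [3,4]:
--         lord = _next_adhipati(dhasa_lord, dirn=1)
--     elif antardhasa_option in [5,6]:
--         lord = _next_adhipati(dhasa_lord, dirn=-1)
--     dirn = 1 if antardhasa_option in [1,3,5] else -1
--     _bhukthis = []
--     for _ in range(len(dhasa_adhipathi_list)):
--         _bhukthis.append(lord)
--         lord = _next_adhipati(lord,dirn)
--     return _bhukthis
-- ===== SOURCE B (Python) =====
-- dhasa_adhipathi_list = {0:7,4:9,8:11,3:13,7:15,2:17,6:19,1:21} #  Total 112 years
--
-- def _antardhasa(dhasa_lord, antardhasa_option=1):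
--     keys = list(dhasa_adhipathi_list.keys())
--     n = len(keys)
--     start = keys.index(dhasa_lord)
--     if antardhasa_option in [3, 4]:
--         start = (start + 1) % n
--     elif antardhasa_option in [5, 6]:
--         start = (start - 1) % n
--     if antardhasa_option in [1, 3, 5]:
--         return keys[start:] + keys[:start]
--     return keys[start::-1] + keys[:start:-1]
-- ===== Notes on version B (the rewrite author's own statement) =====
-- stated objective: simpler
-- what changed: B computes the start index once, adjusts it by +/-1 mod 8 for options {3,4}/{5,6}, and returns the rotation as two list slices (forward: keys[start:]+keys[:start]; reverse: keys[start::-1]+keys[:start:-1]) instead of A's loop that chases _next_adhipati one element at a time with a fresh list.index scan per step.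
import Mathlib
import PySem

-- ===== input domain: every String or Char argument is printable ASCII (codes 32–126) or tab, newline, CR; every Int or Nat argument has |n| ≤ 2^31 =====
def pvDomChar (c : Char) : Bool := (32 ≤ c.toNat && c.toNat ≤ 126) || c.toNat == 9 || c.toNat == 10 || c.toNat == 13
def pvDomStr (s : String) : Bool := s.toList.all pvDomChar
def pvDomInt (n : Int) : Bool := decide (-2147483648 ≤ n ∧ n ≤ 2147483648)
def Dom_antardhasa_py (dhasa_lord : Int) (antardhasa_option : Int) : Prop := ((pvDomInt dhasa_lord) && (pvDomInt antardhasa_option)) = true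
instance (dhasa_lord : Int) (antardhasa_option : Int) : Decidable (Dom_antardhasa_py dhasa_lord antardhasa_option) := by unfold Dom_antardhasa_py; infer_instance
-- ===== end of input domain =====

-- B replaces A's element-by-element _next_adhipati chase with one index computation and two slices (simpler).


-- keys of the module-level dict dhasa_adhipathi_list (insertion order), shared by both Pythons
def dhasaAdhipathiKeys : List Int := [0, 4, 8, 3, 7, 2, 6, 1]

-- ===== PORT A =====
-- _next_adhipati; the `none` branch is Python's ValueError from list.index (excluded by Pre_)
def nextAdhipatiA (lord : Int) (dirn : Int) : Int :=
  match PySem.List.index? dhasaAdhipathiKeys lord with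
  | some current =>
      (PySem.List.pyGet? dhasaAdhipathiKeys (PySem.Int.mod ((current : Int) + dirn) 8)).getD 0
  | none => 0

def antardhasa_py (dhasa_lord : Int) (antardhasa_option : Int) : List Int :=
  let lord0 := dhasa_lord
  let lord1 :=
    if antardhasa_option = 3 ∨ antardhasa_option = 4 then nextAdhipatiA dhasa_lord 1
    else if antardhasa_option = 5 ∨ antardhasa_option = 6 then nextAdhipatiA dhasa_lord (-1)
    else lord0
  let dirn : Int :=
    if antardhasa_option = 1 ∨ antardhasa_option = 3 ∨ antardhasa_option = 5 then 1 else -1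
  let st := (PySem.List.pyRange 0 8 1).foldl
    (fun (st : Int × List Int) _ => (nextAdhipatiA st.1 dirn, st.2 ++ [st.1])) (lord1, [])
  st.2

-- ===== PORT B =====
def antardhasa_py_alt (dhasa_lord : Int) (antardhasa_option : Int) : List Int :=
  let keys := dhasaAdhipathiKeys
  let n : Int := 8
  match PySem.List.index? keys dhasa_lord with
  | none => []   -- Python raises ValueError here (excluded by Pre_)
  | some s0 =>
    let start : Int :=
      if antardhasa_option = 3 ∨ antardhasa_option = 4 then PySem.Int.mod ((s0 : Int) + 1) n
      else if antardhasa_option = 5 ∨ antardhasa_option = 6 then PySem.Int.mod ((s0 : Int) - 1) n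
      else (s0 : Int)
    if antardhasa_option = 1 ∨ antardhasa_option = 3 ∨ antardhasa_option = 5 then
      PySem.List.slice keys (some start) none ++ PySem.List.slice keys none (some start)
    else
      (PySem.List.slice? keys (some start) none (-1)).getD [] ++
      (PySem.List.slice? keys none (some start) (-1)).getD []

-- ===== PRECONDITION & SPEC =====
-- Pre_ excludes lords absent from dhasa_adhipathi_list, where A (and B) raise ValueError via list.index.
def Pre_antardhasa_py (dhasa_lord : Int) (antardhasa_option : Int) : Prop :=
  dhasa_lord ∈ ([0, 4, 8, 3, 7, 2, 6, 1] : List Int)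
instance (dhasa_lord : Int) (antardhasa_option : Int) : Decidable (Pre_antardhasa_py dhasa_lord antardhasa_option) := by unfold Pre_antardhasa_py; infer_instance

def pvWitness_antardhasa_py : Int × Int := (7, 2)

def Spec_antardhasa_py (dhasa_lord : Int) (antardhasa_option : Int) (out : List Int) : Prop := out = antardhasa_py_alt dhasa_lord antardhasa_option
instance (dhasa_lord : Int) (antardhasa_option : Int) (out : List Int) : Decidable (Spec_antardhasa_py dhasa_lord antardhasa_option out) := by unfold Spec_antardhasa_py; infer_instance

-- ===== CLAIM (what is proved, stated in full; the proofs are below) =====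
def Claim_equal_antardhasa_py : Prop := ∀ (dhasa_lord : Int) (antardhasa_option : Int), Dom_antardhasa_py dhasa_lord antardhasa_option → Pre_antardhasa_py dhasa_lord antardhasa_option → Spec_antardhasa_py dhasa_lord antardhasa_option (antardhasa_py dhasa_lord antardhasa_option)

-- ===== LEMMAS AND PROOFS =====

-- For a fixed lord in the list, A and B agree for every option: the result depends on the
-- option only through the three membership tests, which both ports share verbatim.
theorem antardhasa_fixed_lord (d o : Int) (hd : d ∈ dhasaAdhipathiKeys) :
    antardhasa_py d o = antardhasa_py_alt d o := by
  by_cases h1 : o = 3 ∨ o = 4 <;>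
  by_cases h2 : o = 5 ∨ o = 6 <;>
  by_cases h3 : o = 1 ∨ o = 3 ∨ o = 5 <;>
  · fin_cases hd <;>
      simp only [antardhasa_py, antardhasa_py_alt, h1, h2, h3, if_true, if_false] <;> decide

-- ===== VERDICT (by name: the statement is the Claim_ definition above) =====
theorem antardhasa_py_spec : Claim_equal_antardhasa_py := by
  intro d o _ hpre
  exact antardhasa_fixed_lord d o hpre
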